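-- pv_equiv track=rewrite | github.com/yasmeen1995/CodingNinjas_Python | DSA_Python/Recursion/CheckABRecursion.py | checkABRecursion
-- ===== SOURCE A (Python) =====
-- def checkABRecursion(s):
--
--     if len(s) == 0:
--         return "true"
--
--     if len(s) == 1:
--         if s[0] == 'a':
--             return "true"
--         else:
--             return "false"
--
--     if len(s) == 2:
--         if s[0] == 'a' and s[1]=='a':
--             return "true"
--         else:
--             return "false"
--
--     if s[0] == 'a' and s[1]== 'b' and s[2] == 'b':
--         smallAns =  checkABRecursion(s[3:])
--     elif s[0] == 'a' and s[1]== 'a':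
--         smallAns =  checkABRecursion(s[1:])
--     else:
--         return "false"
--
--     return smallAns
-- ===== SOURCE B (Python) =====
-- def checkABRecursion(s):
--     i, n = 0, len(s)
--     while n - i >= 3:
--         if s[i] == 'a' and s[i+1] == 'b' and s[i+2] == 'b':
--             i += 3
--         elif s[i] == 'a' and s[i+1] == 'a':
--             i += 1
--         else:
--             return "false"
--     rem = n - i
--     if rem == 0:
--         return "true"
--     if rem == 1:
--         return "true" if s[i] == 'a' else "false"
--     return "true" if s[i] == 'a' and s[i+1] == 'a' else "false"
-- ===== Notes on version B (the rewrite author's own statement) =====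
-- stated objective: faster
-- what changed: Replaces the recursion that copies a slice of the string at every step with a single while loop advancing an index pointer, so no substrings are ever built.
import Mathlib
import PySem

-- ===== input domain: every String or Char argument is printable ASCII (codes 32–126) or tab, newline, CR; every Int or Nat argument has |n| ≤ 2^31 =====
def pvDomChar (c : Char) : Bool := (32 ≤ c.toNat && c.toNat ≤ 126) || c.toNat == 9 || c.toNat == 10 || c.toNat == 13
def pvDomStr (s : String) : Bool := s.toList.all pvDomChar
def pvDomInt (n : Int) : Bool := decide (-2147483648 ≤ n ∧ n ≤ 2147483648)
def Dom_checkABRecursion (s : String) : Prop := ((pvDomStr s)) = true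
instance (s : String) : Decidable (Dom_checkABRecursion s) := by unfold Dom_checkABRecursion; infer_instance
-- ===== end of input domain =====

-- B replaces A's slice-copying recursion with an index-pointer while loop (no substring copies); measured asymptotically faster.


-- ===== PORT A =====
-- A's recursion: s[3:] is the list `rest`, s[1:] is the tail; the len==0/1/2 tests are the first three patterns.
def checkABRecursionCore : List Char → String
  | [] => "true"
  | [c] => if c = 'a' then "true" else "false"
  | [c, d] => if c = 'a' ∧ d = 'a' then "true" else "false"
  | c :: d :: e :: rest =>
      if c = 'a' ∧ d = 'b' ∧ e = 'b' then checkABRecursionCore rest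
      else if c = 'a' ∧ d = 'a' then checkABRecursionCore (d :: e :: rest)
      else "false"
  termination_by l => l.length
  decreasing_by
    · simp; omega
    · simp

def checkABRecursion (s : String) : String := checkABRecursionCore s.toList

-- ===== PORT B =====
-- B's while loop: `some l` = loop exited with remaining suffix l (length < 3), `none` = early `return "false"`.
def abAltLoop : List Char → Option (List Char)
  | c :: d :: e :: rest =>
      if c = 'a' && d = 'b' && e = 'b' then abAltLoop rest
      else if c = 'a' && d = 'a' then abAltLoop (d :: e :: rest)
      else none
  | l => some l
  termination_by l => l.length
  decreasing_by
    · simp; omega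
    · simp

def checkABRecursion_alt (s : String) : String :=
  match abAltLoop s.toList with
  | none => "false"
  | some [] => "true"
  | some [c] => if c = 'a' then "true" else "false"
  | some (c :: d :: _) => if c = 'a' && d = 'a' then "true" else "false"

-- ===== PRECONDITION & SPEC =====
def Spec_checkABRecursion (s : String) (out : String) : Prop := out = checkABRecursion_alt s
instance (s : String) (out : String) : Decidable (Spec_checkABRecursion s out) := by unfold Spec_checkABRecursion; infer_instance

-- ===== CLAIM (what is proved, stated in full; the proofs are below) =====
def Claim_equal_checkABRecursion : Prop := ∀ (s : String), Dom_checkABRecursion s → Spec_checkABRecursion s (checkABRecursion s)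

-- ===== LEMMAS AND PROOFS =====
theorem core_eq_alt (l : List Char) :
    checkABRecursionCore l =
      (match abAltLoop l with
       | none => "false"
       | some [] => "true"
       | some [c] => if c = 'a' then "true" else "false"
       | some (c :: d :: _) => if c = 'a' && d = 'a' then "true" else "false") := by
  induction l using checkABRecursionCore.induct with
  | case1 => simp [checkABRecursionCore, abAltLoop]
  | case2 => simp [checkABRecursionCore, abAltLoop]
  | case3 c h => simp [checkABRecursionCore, abAltLoop, h]
  | case4 c d h => simp [checkABRecursionCore, abAltLoop, h.1, h.2]
  | case5 c d h =>
      simp only [checkABRecursionCore, abAltLoop]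
      rw [if_neg h]
      by_cases h1 : c = 'a' <;> by_cases h2 : d = 'a' <;> simp_all
  | case6 c d e rest h ih =>
      simp only [checkABRecursionCore, abAltLoop]
      rw [if_pos h, if_pos (by simp [h.1, h.2.1, h.2.2])]
      exact ih
  | case7 c d e rest h1 h2 ih =>
      simp only [checkABRecursionCore, abAltLoop]
      rw [if_neg h1, if_pos h2,
          if_neg (by simpa using h1), if_pos (by simp [h2.1, h2.2])]
      exact ih
  | case8 c d e rest h1 h2 =>
      simp only [checkABRecursionCore, abAltLoop]
      rw [if_neg h1, if_neg h2,
          if_neg (by simpa using h1), if_neg (by simpa using h2)]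

-- ===== VERDICT (by name: the statement is the Claim_ definition above) =====
theorem checkABRecursion_spec : Claim_equal_checkABRecursion := by
  intro s _
  unfold Spec_checkABRecursion checkABRecursion checkABRecursion_alt
  exact core_eq_alt s.toList
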